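-- pv_equiv track=rewrite | github.com/avdes96/advent_of_code | day_05/solution.py | construct_rule_set
-- ===== SOURCE A (Python) =====
-- def construct_rule_set(rules: list[str]) -> dict[str, list[str]]:
-- 	rule_set = {}
-- 	for rule in rules:
-- 		before, after = rule.split("|")
-- 		if before not in rule_set:
-- 			rule_set[before] = []
-- 		if after not in rule_set:
-- 			rule_set[after] = []
-- 		rule_set[after].append(before)
-- 	return rule_set
-- ===== SOURCE B (Python) =====
-- def construct_rule_set(rules: list[str]) -> dict[str, list[str]]:
--     pairs = [tuple(rule.split("|")) for rule in rules]
--     keys = dict.fromkeys(t for p in pairs for t in p)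
--     return {k: [b for b, a in pairs if a == k] for k in keys}
-- ===== Notes on version B (the rewrite author's own statement) =====
-- stated objective: alternative
-- what changed: B never builds a dict incrementally: it parses the rules once, derives the ordered distinct key list with dict.fromkeys, and constructs each key's predecessor list by a per-key filter over the parsed pairs (O(n*k) scans) instead of A's single pass of conditional inserts and in-place appends.
import Mathlib
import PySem

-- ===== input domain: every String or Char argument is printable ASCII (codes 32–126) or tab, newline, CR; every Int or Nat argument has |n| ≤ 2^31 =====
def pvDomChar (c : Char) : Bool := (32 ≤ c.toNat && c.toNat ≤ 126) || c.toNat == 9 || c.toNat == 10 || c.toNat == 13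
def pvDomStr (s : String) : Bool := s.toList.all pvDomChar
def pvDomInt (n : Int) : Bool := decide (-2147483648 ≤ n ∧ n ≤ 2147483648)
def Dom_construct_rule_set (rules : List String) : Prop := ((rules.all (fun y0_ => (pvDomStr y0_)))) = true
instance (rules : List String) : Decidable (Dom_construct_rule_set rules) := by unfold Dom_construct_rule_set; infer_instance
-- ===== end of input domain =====

-- B builds no dict incrementally: it parses the rules once, takes the ordered distinct
-- keys via dict.fromkeys, and computes each key's list by filtering the parsed pairs.

-- ===== PORT A =====
-- one iteration of A's loop body: unpack rule.split("|"), init missing keys, append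
def construct_rule_set_step (d : PySem.Dict String (List String)) (rule : String) :
    PySem.Dict String (List String) :=
  match PySem.Str.split? rule "|" with
  | some [before, after] =>
      let d := if d.contains before then d else d.insert before []
      let d := if d.contains after then d else d.insert after []
      d.modify after [] (fun l => l ++ [before])
  | _ => d  -- Python raises ValueError here; excluded by Pre_

def construct_rule_set (rules : List String) : List (String × List String) :=
  (rules.foldl construct_rule_set_step PySem.Dict.empty).items

-- ===== PORT B =====
def construct_rule_set_alt (rules : List String) : List (String × List String) :=
  -- pairs = [tuple(rule.split("|")) for rule in rules]
  let pairs := rules.map (fun rule => PySem.Str.split? rule "|")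
  -- keys = dict.fromkeys(t for p in pairs for t in p)
  let keys := PySem.List.dedup (pairs.flatMap (fun p => p.getD []))
  -- {k: [b for b, a in pairs if a == k] for k in keys}
  keys.map (fun k => (k, pairs.filterMap (fun p =>
    match p with
    | some [b, a] => if a == k then some b else none
    | _ => none)))  -- Python raises ValueError unpacking a non-pair; excluded by Pre_

-- ===== PRECONDITION & SPEC =====
-- Pre_ excludes rules that do not split on "|" into exactly two parts: there A's
-- `before, after = rule.split("|")` and B's `for b, a in pairs` both raise ValueError.
def Pre_construct_rule_set (rules : List String) : Prop :=
  ∀ r ∈ rules, ((PySem.Str.split? r "|").getD []).length = 2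
instance (rules : List String) : Decidable (Pre_construct_rule_set rules) := by
  unfold Pre_construct_rule_set; infer_instance

def pvWitness_construct_rule_set : List String := ["47|53", "97|13", "97|53"]

def Spec_construct_rule_set (rules : List String) (out : List (String × List String)) : Prop := out = construct_rule_set_alt rules
instance (rules : List String) (out : List (String × List String)) : Decidable (Spec_construct_rule_set rules out) := by unfold Spec_construct_rule_set; infer_instance

-- ===== CLAIM (what is proved, stated in full; the proofs are below) =====
def Claim_equal_construct_rule_set : Prop := ∀ (rules : List String), Dom_construct_rule_set rules → Pre_construct_rule_set rules → Spec_construct_rule_set rules (construct_rule_set rules)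

-- ===== LEMMAS AND PROOFS =====

-- the keys a rule contributes, in A's first-touch order
def pvKeyList (rules : List String) : List String :=
  rules.flatMap (fun r =>
    match PySem.Str.split? r "|" with
    | some [b, a] => [b, a]
    | _ => [])

-- the (after, before) pairs of the well-formed rules, in order
def pvPairList (rules : List String) : List (String × String) :=
  rules.flatMap (fun r =>
    match PySem.Str.split? r "|" with
    | some [b, a] => [(a, b)]
    | _ => [])

theorem pvKeyList_cons (r : String) (rs : List String) :
    pvKeyList (r :: rs) = pvKeyList [r] ++ pvKeyList rs := by
  simp [pvKeyList]

theorem pvPairList_cons (r : String) (rs : List String) :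
    pvPairList (r :: rs) = pvPairList [r] ++ pvPairList rs := by
  simp [pvPairList]

-- a rule admitted by Pre_ splits into exactly two parts
theorem pv_split_two (r : String) (h : ((PySem.Str.split? r "|").getD []).length = 2) :
    ∃ b a, PySem.Str.split? r "|" = some [b, a] := by
  match hs : PySem.Str.split? r "|" with
  | none => rw [hs] at h; simp at h
  | some l =>
      rw [hs] at h; simp at h
      match l, h with
      | [b, a], _ => exact ⟨b, a, rfl⟩

theorem pv_keys_insert_if (d : PySem.Dict String (List String)) (k : String) :
    (if d.contains k then d else d.insert k ([] : List String)).keys = PySem.Set.add d.keys k := by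
  by_cases h : d.contains k = true
  · have hm : k ∈ d.keys := by
      rw [PySem.Dict.contains_eq_decide_mem_keys] at h; simpa using h
    simp [h, PySem.Set.add_of_mem hm]
  · have h' : d.contains k = false := by simpa using h
    rw [if_neg (by simp [h']), PySem.Dict.keys_insert_of_not_contains _ _ h']
    have : k ∉ d.keys := by
      rw [PySem.Dict.contains_eq_decide_mem_keys] at h'
      simpa using h'
    simp [PySem.Set.add_of_not_mem this]

theorem pv_keys_modify (d : PySem.Dict String (List String)) (k : String)
    (f : List String → List String) :
    (d.modify k [] f).keys = PySem.Set.add d.keys k := by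
  rw [PySem.Dict.keys_modify]
  by_cases h : d.contains k = true
  · have : k ∈ d.keys := by
      rw [PySem.Dict.contains_eq_decide_mem_keys] at h; simpa using h
    rw [PySem.Dict.keys_insert_of_contains _ _ h, PySem.Set.add_of_mem this]
  · have h' : d.contains k = false := by simpa using h
    have : k ∉ d.keys := by
      rw [PySem.Dict.contains_eq_decide_mem_keys] at h'; simpa using h'
    rw [PySem.Dict.keys_insert_of_not_contains _ _ h', PySem.Set.add_of_not_mem this]

theorem pv_add_add_self (s : PySem.Set String) (a : String) :
    PySem.Set.add (PySem.Set.add s a) a = PySem.Set.add s a := by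
  apply PySem.Set.add_of_mem
  simp [PySem.Set.mem_add]

-- A's loop: keys touched in first-appearance order
theorem pv_keys_foldA (rules : List String) :
    ∀ d : PySem.Dict String (List String),
      (rules.foldl construct_rule_set_step d).keys = PySem.Set.update d.keys (pvKeyList rules) := by
  induction rules with
  | nil => intro d; simp [pvKeyList, PySem.Set.update]
  | cons r rs ih =>
    intro d
    rw [List.foldl_cons, ih]
    have hstep : (construct_rule_set_step d r).keys =
        PySem.Set.update d.keys (pvKeyList [r]) := by
      unfold construct_rule_set_step
      match hs : PySem.Str.split? r "|" with
      | none => simp [pvKeyList, hs, PySem.Set.update]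
      | some [] => simp [pvKeyList, hs, PySem.Set.update]
      | some [x] => simp [pvKeyList, hs, PySem.Set.update]
      | some (x :: y :: z :: t) => simp [pvKeyList, hs, PySem.Set.update]
      | some [b, a] =>
        simp only
        rw [pv_keys_modify, pv_keys_insert_if, pv_keys_insert_if, pv_add_add_self]
        simp [pvKeyList, hs, PySem.Set.update]
    rw [pvKeyList_cons r rs, PySem.Set.update_append, hstep]

-- getD at default [] is unchanged by the conditional insert
theorem pv_getD_insert_if (d : PySem.Dict String (List String)) (k j : String) :
    (if d.contains k then d else d.insert k ([] : List String)).getD j [] = d.getD j [] := by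
  by_cases h : d.contains k = true
  · simp [h]
  · have h' : d.contains k = false := by simpa using h
    rw [if_neg (by simp [h']), PySem.Dict.getD_insert]
    by_cases hj : j = k
    · subst hj; simp [PySem.Dict.getD_of_not_contains _ _ h']
    · simp [hj]

-- A's loop: the value at each key
theorem pv_getD_foldA (rules : List String) :
    ∀ (d : PySem.Dict String (List String)) (k : String),
      (rules.foldl construct_rule_set_step d).getD k [] =
        d.getD k [] ++ ((pvPairList rules).filter (fun p => p.1 == k)).map (·.2) := by
  induction rules with
  | nil => intro d k; simp [pvPairList]
  | cons r rs ih =>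
    intro d k
    rw [List.foldl_cons, ih]
    have hstep : (construct_rule_set_step d r).getD k [] =
        d.getD k [] ++ ((pvPairList [r]).filter (fun p => p.1 == k)).map (·.2) := by
      unfold construct_rule_set_step
      match hs : PySem.Str.split? r "|" with
      | none => simp [pvPairList, hs]
      | some [] => simp [pvPairList, hs]
      | some [x] => simp [pvPairList, hs]
      | some (x :: y :: z :: t) => simp [pvPairList, hs]
      | some [b, a] =>
        simp only
        rw [PySem.Dict.getD_modify]
        by_cases hk : k = a
        · subst hk
          rw [if_pos rfl, pv_getD_insert_if, pv_getD_insert_if]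
          simp [pvPairList, hs]
        · rw [if_neg hk, pv_getD_insert_if, pv_getD_insert_if]
          simp [pvPairList, hs, Ne.symm hk]
    rw [pvPairList_cons r rs, List.filter_append, List.map_append, ← List.append_assoc, hstep]

-- B's key pass: under Pre_, the flattened split tokens are exactly A's key list
theorem pv_flat_keys (rules : List String)
    (h : ∀ r ∈ rules, ((PySem.Str.split? r "|").getD []).length = 2) :
    (rules.map (fun rule => PySem.Str.split? rule "|")).flatMap (fun p => p.getD []) =
      pvKeyList rules := by
  induction rules with
  | nil => simp [pvKeyList]
  | cons r rs ih =>
    obtain ⟨b, a, hs⟩ := pv_split_two r (h r (by simp))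
    rw [List.map_cons, List.flatMap_cons, ih (fun x hx => h x (by simp [hx])),
      pvKeyList_cons]
    simp [pvKeyList, hs]

-- B's per-key comprehension, under Pre_, in terms of the ordered pair list
theorem pv_filterMap_pairs (rules : List String) (k : String)
    (h : ∀ r ∈ rules, ((PySem.Str.split? r "|").getD []).length = 2) :
    (rules.map (fun rule => PySem.Str.split? rule "|")).filterMap (fun p =>
        match p with
        | some [b, a] => if a == k then some b else none
        | _ => none) =
      ((pvPairList rules).filter (fun p => p.1 == k)).map (·.2) := by
  induction rules with
  | nil => simp [pvPairList]
  | cons r rs ih =>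
    obtain ⟨b, a, hs⟩ := pv_split_two r (h r (by simp))
    rw [List.map_cons, List.filterMap_cons, ih (fun x hx => h x (by simp [hx])),
      pvPairList_cons]
    by_cases hk : a = k
    · subst hk; simp [pvPairList, hs]
    · simp [pvPairList, hs, hk]

-- ===== VERDICT (by name: the statement is the Claim_ definition above) =====
theorem construct_rule_set_spec : Claim_equal_construct_rule_set := by
  intro rules _ hpre
  unfold Spec_construct_rule_set construct_rule_set construct_rule_set_alt
  simp only
  set dA := rules.foldl construct_rule_set_step PySem.Dict.empty with hdA
  have hKA : dA.keys = PySem.Set.update [] (pvKeyList rules) := by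
    rw [hdA, pv_keys_foldA]; simp [PySem.Dict.keys_empty]
  have hnodup : dA.keys.Nodup := by
    rw [hKA]; exact PySem.Set.nodup_update _ _ (List.nodup_nil)
  rw [PySem.Dict.items_eq_map_keys dA hnodup ([] : List String), hKA,
    pv_flat_keys rules hpre]
  have hkeysB : PySem.List.dedup (pvKeyList rules) =
      PySem.Set.update [] (pvKeyList rules) := by
    rw [PySem.Set.update_nil_left]; simp
  rw [hkeysB]
  apply List.map_congr_left
  intro k _
  rw [pv_filterMap_pairs rules k hpre, hdA, pv_getD_foldA]
  simp [PySem.Dict.getD_empty]
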